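-- pv_equiv track=rewrite | github.com/Clavss/AdventofCode | src/_2021/day10/main.py | sym_incomplete
-- ===== SOURCE A (Python) =====
-- def correspond(s1, s2):
-- 	return '([{<'.index(s2) == ')]}>'.index(s1)
--
-- def sym_incomplete(line):
-- 	sym_open = '([{<'
-- 	sym_close = ')]}>'
-- 	stack = []
--
-- 	for symbol in line:
-- 		if symbol in sym_open:
-- 			stack.append(symbol)
-- 		elif symbol in sym_close:
-- 			if len(stack) == 0 or not correspond(symbol, stack.pop()):
-- 				return ''
-- 	return ''.join(stack[::-1])
-- ===== SOURCE B (Python) =====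
-- def sym_incomplete(line):
--     s = ''.join(c for c in line if c in '()[]{}<>')
--     while True:
--         t = s.replace('()', '').replace('[]', '').replace('{}', '').replace('<>', '')
--         if t == s:
--             break
--         s = t
--     if any(c in ')]}>' for c in s):
--         return ''
--     return s[::-1]
-- ===== Notes on version B (the rewrite author's own statement) =====
-- stated objective: alternative
-- what changed: Replaced the explicit stack scan with a string-rewriting reduction: filter the line to bracket characters, repeatedly delete adjacent matched pairs via str.replace until a fixpoint, then read corruption (a surviving closer) or the reversed residue of unmatched openers.
import Mathlib
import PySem

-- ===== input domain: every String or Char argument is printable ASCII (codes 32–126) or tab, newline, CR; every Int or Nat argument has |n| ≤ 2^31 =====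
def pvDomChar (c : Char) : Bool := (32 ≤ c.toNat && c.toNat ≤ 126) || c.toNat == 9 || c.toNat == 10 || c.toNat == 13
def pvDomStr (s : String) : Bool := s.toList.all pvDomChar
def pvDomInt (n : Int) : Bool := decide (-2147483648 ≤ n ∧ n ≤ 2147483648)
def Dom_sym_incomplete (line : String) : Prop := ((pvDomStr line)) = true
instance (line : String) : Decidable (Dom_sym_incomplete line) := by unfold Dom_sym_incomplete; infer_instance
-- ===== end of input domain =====

-- B replaces A's explicit stack with a fixpoint pair-deletion rewriting (objective: alternative).

-- ===== PORT A =====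
-- the locals sym_open = '([{<' and sym_close = ')]}>' of A
def symOpen : List Char := "([{<".toList
def symClose : List Char := ")]}>".toList

-- correspond(s1, s2): '([{<'.index(s2) == ')]}>'.index(s1)  (str.index ported with
-- PySem.List.index?; both calls are on single characters present at every reachable call site)
def correspond (s1 s2 : Char) : Bool :=
  PySem.List.index? symOpen s2 == PySem.List.index? symClose s1

-- the for-loop of A: Python appends to / pops from the END of `stack`
def symGoA : List Char → List Char → String
  | [], stack => String.ofList stack.reverse        -- ''.join(stack[::-1])
  | c :: rest, stack =>
    if symOpen.contains c then symGoA rest (stack ++ [c])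
    else if symClose.contains c then
      match stack.getLast? with                      -- len(stack) == 0 / stack.pop()
      | none => ""
      | some top => if correspond c top then symGoA rest stack.dropLast else ""
    else symGoA rest stack

def sym_incomplete (line : String) : String := symGoA line.toList []

-- ===== PORT B =====
-- one sweep of the while-body: s.replace('()','').replace('[]','').replace('{}','').replace('<>','')
def reduceB (s : List Char) : List Char :=
  PySem.Chars.replace (PySem.Chars.replace (PySem.Chars.replace
    (PySem.Chars.replace s "()".toList []) "[]".toList []) "{}".toList []) "<>".toList []

-- the while loop; the fuel bounds the number of iterations (each changing sweep shortens s,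
-- see reduceB_length_lt below, so s.length + 1 iterations always reach the fixpoint)
def loopB : Nat → List Char → List Char
  | 0, s => s
  | fuel + 1, s => let t := reduceB s; if t = s then s else loopB fuel t

def sym_incomplete_alt (line : String) : String :=
  let s := line.toList.filter (fun c => "()[]{}<>".toList.contains c)  -- ''.join(c for c in line if c in '()[]{}<>')
  let r := loopB (s.length + 1) s
  if r.any (fun c => ")]}>".toList.contains c) then "" else String.ofList r.reverse  -- s[::-1]

-- ===== PRECONDITION & SPEC =====
def Spec_sym_incomplete (line : String) (out : String) : Prop := out = sym_incomplete_alt line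
instance (line : String) (out : String) : Decidable (Spec_sym_incomplete line out) := by unfold Spec_sym_incomplete; infer_instance

-- ===== CLAIM (what is proved, stated in full; the proofs are below) =====
def Claim_equal_sym_incomplete : Prop := ∀ (line : String), Dom_sym_incomplete line → Spec_sym_incomplete line (sym_incomplete line)

-- ===== LEMMAS AND PROOFS =====

-- character classes used by the proofs
def isOpenB (c : Char) : Bool := symOpen.contains c
def isCloseB (c : Char) : Bool := symClose.contains c
def isBracketB (c : Char) : Bool := "()[]{}<>".toList.contains c

-- A's loop re-expressed with the stack held most-recent-first
def runM : List Char → List Char → Option (List Char)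
  | [], st => some st
  | c :: rest, st =>
    if isOpenB c then runM rest (c :: st)
    else if isCloseB c then
      match st with
      | [] => none
      | top :: st' => if correspond c top then runM rest st' else none
    else runM rest st

-- removal of all (non-overlapping, left-to-right) occurrences of the two-char pattern [o, c]
def rem (o c : Char) : List Char → List Char
  | [] => []
  | [x] => [x]
  | x :: y :: t => if x = o ∧ y = c then rem o c t else x :: rem o c (y :: t)

lemma bracket_iff (c : Char) : isBracketB c = (isOpenB c || isCloseB c) := by
  simp only [isBracketB, isOpenB, isCloseB, symOpen, symClose,
    show "()[]{}<>".toList = ['(', ')', '[', ']', '{', '}', '<', '>'] from rfl,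
    show "([{<".toList = ['(', '[', '{', '<'] from rfl,
    show ")]}>".toList = [')', ']', '}', '>'] from rfl,
    List.contains_cons, List.contains_nil, Bool.or_false]
  cases c == '(' <;> cases c == ')' <;> cases c == '[' <;> cases c == ']' <;>
    cases c == '{' <;> cases c == '}' <;> cases c == '<' <;> cases c == '>' <;> rfl

lemma open_not_close (c : Char) (h : isOpenB c = true) : isCloseB c = false := by
  simp only [isOpenB, isCloseB, symOpen, symClose,
    show "([{<".toList = ['(', '[', '{', '<'] from rfl,
    show ")]}>".toList = [')', ']', '}', '>'] from rfl,
    List.contains_cons, List.contains_nil, Bool.or_false,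
    Bool.or_eq_true, beq_iff_eq] at h ⊢
  rcases h with h | h | h | h <;> subst h <;> decide

lemma close_not_open (c : Char) (h : isCloseB c = true) : isOpenB c = false := by
  simp only [isOpenB, isCloseB, symOpen, symClose,
    show "([{<".toList = ['(', '[', '{', '<'] from rfl,
    show ")]}>".toList = [')', ']', '}', '>'] from rfl,
    List.contains_cons, List.contains_nil, Bool.or_false,
    Bool.or_eq_true, beq_iff_eq] at h ⊢
  rcases h with h | h | h | h <;> subst h <;> decide

-- A's loop with the stack held most-recent-first
lemma bridgeA (t : List Char) : ∀ stack : List Char,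
    symGoA t stack = (match runM t stack.reverse with
      | none => "" | some st => String.ofList st) := by
  induction t with
  | nil => intro stack; rfl
  | cons c rest ih =>
    intro stack
    by_cases ho : isOpenB c
    · have ho' : symOpen.contains c = true := ho
      simp only [symGoA, runM, ho, ho', if_pos]
      rw [ih]
      simp
    · have ho' : symOpen.contains c = false := by simp only [Bool.not_eq_true] at ho; exact ho
      by_cases hc : isCloseB c
      · have hc' : symClose.contains c = true := hc
        simp only [symGoA, runM, ho, ho', hc, hc', Bool.false_eq_true, if_false, if_pos]
        rcases h : stack.reverse with _ | ⟨top, st'⟩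
        · have : stack = [] := by simpa using h
          subst this
          rfl
        · have hs : stack = st'.reverse ++ [top] := by
            have := congrArg List.reverse h
            simpa using this
          subst hs
          simp only [List.getLast?_concat, List.dropLast_concat]
          by_cases hcor : correspond c top
          · simp only [hcor, if_pos, ih, List.reverse_reverse]
          · simp [hcor]
      · have hc' : symClose.contains c = false := by simp only [Bool.not_eq_true] at hc; exact hc
        simp only [symGoA, runM, ho, ho', hc, hc', Bool.false_eq_true, if_false]
        exact ih stack

-- runM ignores non-bracket characters
lemma runM_filter (s : List Char) : ∀ st, runM s st = runM (s.filter isBracketB) st := by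
  induction s with
  | nil => intro st; rfl
  | cons c t ih =>
    intro st
    by_cases hb : isBracketB c
    · rw [List.filter_cons_of_pos hb]
      by_cases ho : isOpenB c
      · simp only [runM, ho, if_pos]
        exact ih _
      · by_cases hcl : isCloseB c
        · simp only [runM, ho, hcl, Bool.false_eq_true, if_false, if_pos]
          rcases st with _ | ⟨top, st'⟩
          · rfl
          · by_cases hcor : correspond c top
            · simp only [hcor, if_pos]
              exact ih _
            · simp [hcor]
        · rw [bracket_iff] at hb
          simp [ho, hcl] at hb
    · rw [List.filter_cons_of_neg (by simpa using hb)]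
      rw [bracket_iff] at hb
      simp only [Bool.or_eq_true, not_or, Bool.not_eq_true] at hb
      simp only [runM, hb.1, hb.2, Bool.false_eq_true, if_false]
      exact ih _

-- PySem replace of a 2-char pattern by '' is `rem`
lemma go_rem (o c : Char) : ∀ (fuel : Nat) (l acc : List Char), l.length ≤ fuel →
    PySem.Chars.replace.go [o, c] [] fuel l acc = acc.reverse ++ rem o c l := by
  intro fuel
  induction fuel with
  | zero =>
    intro l acc h
    have : l = [] := by cases l <;> simp_all
    subst this
    simp [PySem.Chars.replace.go, rem.eq_1]
  | succ n ih =>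
    intro l acc h
    match l with
    | [] => simp [PySem.Chars.replace.go, rem.eq_1]
    | [x] =>
      have hpre : List.isPrefixOf [o, c] [x] = false := by
        simp [List.isPrefixOf]
      rw [PySem.Chars.replace.go, hpre]
      simp only [Bool.false_eq_true, if_false]
      rw [ih [] (x :: acc) (by simp)]
      simp [List.reverse_cons, rem.eq_1, rem.eq_2]
    | x :: y :: t =>
      rw [PySem.Chars.replace.go]
      by_cases hxy : x = o ∧ y = c
      · have hpre : List.isPrefixOf [o, c] (x :: y :: t) = true := by
          simp [List.isPrefixOf, hxy.1, hxy.2]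
        rw [hpre]
        simp only [if_pos]
        have hlen : t.length ≤ n := by simp at h; omega
        rw [show ([o, c] : List Char).length = 2 from rfl]
        rw [show List.drop 2 (x :: y :: t) = t from rfl]
        rw [ih t _ hlen]
        rw [rem.eq_3]
        simp [hxy.1, hxy.2]
      · have hpre : List.isPrefixOf [o, c] (x :: y :: t) = false := by
          have hh : List.isPrefixOf [o, c] (x :: y :: t) = (o == x && c == y) := by
            simp [List.isPrefixOf]
          rw [hh]
          by_cases h1 : o = x
          · by_cases h2 : c = y
            · exact absurd ⟨h1.symm, h2.symm⟩ hxy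
            · simp [h2]
          · simp [h1]
        rw [hpre]
        simp only [Bool.false_eq_true, if_false]
        rw [ih (y :: t) (x :: acc) (by simp at h ⊢; omega)]
        rw [rem.eq_3]
        simp [hxy]

lemma replace_eq_rem (o c : Char) (s : List Char) :
    PySem.Chars.replace s [o, c] [] = rem o c s := by
  rw [PySem.Chars.replace]
  simp only [List.isEmpty, Bool.false_eq_true, if_false]
  rw [go_rem o c s.length s [] le_rfl]
  rfl

lemma rem_subset (o c : Char) : ∀ (s : List Char) (x : Char), x ∈ rem o c s → x ∈ s := by
  intro s
  fun_induction rem o c s with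
  | case1 => intro x h; exact h
  | case2 => intro x h; exact h
  | case3 x y t hxy ih =>
    intro z h
    simp [ih z h]
  | case4 x y t hxy ih =>
    intro z h
    rcases List.mem_cons.mp h with h | h
    · simp [h]
    · rcases List.mem_cons.mp (ih z h) with h' | h' <;> simp [h']

lemma rem_length_le (o c : Char) : ∀ s : List Char, (rem o c s).length ≤ s.length := by
  intro s
  fun_induction rem o c s with
  | case1 => simp
  | case2 x => simp
  | case3 x y t hxy ih => simp only [List.length_cons]; omega
  | case4 x y t hxy ih => simp only [List.length_cons] at ih ⊢; omega

lemma rem_length_lt (o c : Char) : ∀ s : List Char, rem o c s ≠ s → (rem o c s).length < s.length := by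
  intro s
  fun_induction rem o c s with
  | case1 => intro h; exact absurd rfl h
  | case2 x => intro h; exact absurd rfl h
  | case3 x y t hxy ih =>
    intro _
    have := rem_length_le o c t
    simp only [List.length_cons]
    omega
  | case4 x y t hxy ih =>
    intro h
    by_cases h2 : rem o c (y :: t) = y :: t
    · rw [h2] at h
      exact absurd rfl h
    · have := ih h2
      simp only [List.length_cons] at this ⊢
      omega

-- a fixpoint of `rem o c` contains no adjacent o, c
lemma rem_fix_no_adj (o c : Char) : ∀ s : List Char, rem o c s = s →
    ∀ u v : List Char, s ≠ u ++ o :: c :: v := by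
  intro s
  fun_induction rem o c s with
  | case1 =>
    intro _ u v h
    simp at h
  | case2 x =>
    intro _ u v h
    rcases u with _ | ⟨a, u'⟩ <;> simp_all
  | case3 x y t hxy ih =>
    intro hfix
    exfalso
    have h1 : (rem o c t).length ≤ t.length := rem_length_le o c t
    have h2 := congrArg List.length hfix
    simp only [List.length_cons] at h2
    omega
  | case4 x y t hxy ih =>
    intro hfix u v h
    have htail : rem o c (y :: t) = y :: t := by
      exact (List.cons_inj_right x).mp hfix
    rcases u with _ | ⟨a, u'⟩
    · simp only [List.nil_append, List.cons.injEq] at h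
      exact hxy ⟨h.1, h.2.1⟩
    · simp only [List.cons_append, List.cons.injEq] at h
      exact ih htail u' v h.2

-- removing a matched pair does not change runM
lemma runM_rem (o c : Char) (ho : isOpenB o = true) (hc : isCloseB c = true)
    (hcor : correspond c o = true) :
    ∀ s, ∀ st, runM (rem o c s) st = runM s st := by
  intro s
  fun_induction rem o c s with
  | case1 => intro st; rfl
  | case2 x => intro st; rfl
  | case3 x y t hxy ih =>
    intro st
    obtain ⟨rfl, rfl⟩ := hxy
    rw [ih st]
    simp [runM, ho, hc, hcor, close_not_open y hc]
  | case4 x y t hxy ih =>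
    intro st
    by_cases hox : isOpenB x
    · simp only [runM, hox, if_pos]
      exact ih _
    · by_cases hcx : isCloseB x
      · simp only [runM, hox, hcx, Bool.false_eq_true, if_false, if_pos]
        rcases st with _ | ⟨top, st'⟩
        · rfl
        · by_cases hcor2 : correspond x top
          · simp only [hcor2, if_pos]
            exact ih _
          · simp [hcor2]
      · simp only [runM, hox, hcx, Bool.false_eq_true, if_false]
        exact ih _

lemma reduceB_eq (s : List Char) :
    reduceB s = rem '<' '>' (rem '{' '}' (rem '[' ']' (rem '(' ')' s))) := by
  rw [reduceB,
    show "()".toList = ['(', ')'] from rfl, show "[]".toList = ['[', ']'] from rfl,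
    show "{}".toList = ['{', '}'] from rfl, show "<>".toList = ['<', '>'] from rfl,
    replace_eq_rem, replace_eq_rem, replace_eq_rem, replace_eq_rem]

lemma runM_reduceB (s : List Char) (st : List Char) : runM (reduceB s) st = runM s st := by
  rw [reduceB_eq]
  rw [runM_rem '<' '>' (by decide) (by decide) (by decide),
      runM_rem '{' '}' (by decide) (by decide) (by decide),
      runM_rem '[' ']' (by decide) (by decide) (by decide),
      runM_rem '(' ')' (by decide) (by decide) (by decide)]

lemma reduceB_subset (s : List Char) (x : Char) (h : x ∈ reduceB s) : x ∈ s := by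
  rw [reduceB_eq] at h
  exact rem_subset _ _ _ _ (rem_subset _ _ _ _ (rem_subset _ _ _ _ (rem_subset _ _ _ _ h)))

lemma reduceB_length_lt (s : List Char) (h : reduceB s ≠ s) : (reduceB s).length < s.length := by
  rw [reduceB_eq] at h ⊢
  by_cases h1 : rem '(' ')' s = s
  · rw [h1] at h ⊢
    by_cases h2 : rem '[' ']' s = s
    · rw [h2] at h ⊢
      by_cases h3 : rem '{' '}' s = s
      · rw [h3] at h ⊢
        exact rem_length_lt _ _ _ h
      · have := rem_length_lt _ _ _ h3
        have := rem_length_le '<' '>' (rem '{' '}' s)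
        omega
    · have := rem_length_lt _ _ _ h2
      have := rem_length_le '{' '}' (rem '[' ']' s)
      have := rem_length_le '<' '>' (rem '{' '}' (rem '[' ']' s))
      omega
  · have := rem_length_lt _ _ _ h1
    have := rem_length_le '[' ']' (rem '(' ')' s)
    have := rem_length_le '{' '}' (rem '[' ']' (rem '(' ')' s))
    have := rem_length_le '<' '>' (rem '{' '}' (rem '[' ']' (rem '(' ')' s)))
    omega

lemma runM_loopB (fuel : Nat) : ∀ s st, runM (loopB fuel s) st = runM s st := by
  induction fuel with
  | zero => intro s st; rfl
  | succ n ih =>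
    intro s st
    simp only [loopB]
    split
    · rfl
    · rw [ih, runM_reduceB]

lemma loopB_subset (fuel : Nat) : ∀ (s : List Char) (x : Char), x ∈ loopB fuel s → x ∈ s := by
  induction fuel with
  | zero => intro s x h; exact h
  | succ n ih =>
    intro s x h
    simp only [loopB] at h
    split at h
    · exact h
    · exact reduceB_subset _ _ (ih _ _ h)

lemma loopB_fix (fuel : Nat) : ∀ s : List Char, s.length < fuel →
    reduceB (loopB fuel s) = loopB fuel s := by
  induction fuel with
  | zero => intro s h; omega
  | succ n ih =>
    intro s h
    simp only [loopB]
    split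
    · assumption
    · refine ih _ ?_
      have := reduceB_length_lt s (by assumption)
      omega

-- each of the four rems fixes a fixpoint of reduceB
lemma reduceB_fix_each (r : List Char) (h : reduceB r = r) :
    rem '(' ')' r = r ∧ rem '[' ']' r = r ∧ rem '{' '}' r = r ∧ rem '<' '>' r = r := by
  rw [reduceB_eq] at h
  have l1 := rem_length_le '(' ')' r
  have l2 := rem_length_le '[' ']' (rem '(' ')' r)
  have l3 := rem_length_le '{' '}' (rem '[' ']' (rem '(' ')' r))
  have l4 := rem_length_le '<' '>' (rem '{' '}' (rem '[' ']' (rem '(' ')' r)))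
  have hlen : (rem '<' '>' (rem '{' '}' (rem '[' ']' (rem '(' ')' r)))).length = r.length := by
    rw [h]
  have h1 : rem '(' ')' r = r := by
    by_contra hne
    have := rem_length_lt '(' ')' r hne
    omega
  rw [h1] at h l2 l3 l4 hlen
  have h2 : rem '[' ']' r = r := by
    by_contra hne
    have := rem_length_lt '[' ']' r hne
    omega
  rw [h2] at h l3 l4 hlen
  have h3 : rem '{' '}' r = r := by
    by_contra hne
    have := rem_length_lt '{' '}' r hne
    omega
  rw [h3] at h
  exact ⟨h1, h2, h3, h⟩

-- an all-opener prefix just gets pushed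
lemma runM_openers : ∀ (u : List Char), u.all isOpenB → ∀ w st,
    runM (u ++ w) st = runM w (u.reverse ++ st) := by
  intro u
  induction u with
  | nil => intro _ w st; simp
  | cons o u' ih =>
    intro h w st
    simp only [List.all_cons, Bool.and_eq_true] at h
    simp only [List.cons_append, runM, h.1, if_pos]
    rw [ih h.2]
    simp

-- classification of correspond on bracket characters
lemma correspond_pairs (o c0 : Char) (ho : isOpenB o = true) (hc : isCloseB c0 = true)
    (h : correspond c0 o = true) :
    (o = '(' ∧ c0 = ')') ∨ (o = '[' ∧ c0 = ']') ∨ (o = '{' ∧ c0 = '}') ∨ (o = '<' ∧ c0 = '>') := by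
  simp only [isOpenB, isCloseB, symOpen, symClose,
    show "([{<".toList = ['(', '[', '{', '<'] from rfl,
    show ")]}>".toList = [')', ']', '}', '>'] from rfl,
    List.contains_cons, List.contains_nil, Bool.or_false, Bool.or_eq_true, beq_iff_eq] at ho hc
  rcases ho with h1 | h1 | h1 | h1 <;> rcases hc with h2 | h2 | h2 | h2 <;>
    subst h1 <;> subst h2 <;> revert h <;> decide

-- the residue with a surviving closer makes A fail
lemma runM_residue_closer (r : List Char) (hb : r.all isBracketB = true)
    (hfix : reduceB r = r) (hcl : r.any isCloseB = true) : runM r [] = none := by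
  obtain ⟨hf1, hf2, hf3, hf4⟩ := reduceB_fix_each r hfix
  have hdec : r = r.takeWhile isOpenB ++ r.dropWhile isOpenB := (List.takeWhile_append_dropWhile).symm
  rcases hdrop : r.dropWhile isOpenB with _ | ⟨c0, v⟩
  · exfalso
    simp only [List.any_eq_true] at hcl
    obtain ⟨x, hxr, hxc⟩ := hcl
    have hox : isOpenB x = true := List.dropWhile_eq_nil_iff.mp hdrop x hxr
    rw [open_not_close x hox] at hxc
    exact Bool.noConfusion hxc
  · have hc0 : isOpenB c0 = false := by
      have := List.head?_dropWhile_not isOpenB r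
      rw [hdrop] at this
      simpa using this
    have hc0mem : c0 ∈ r := by
      rw [hdec, hdrop]
      simp
    have hc0br : isBracketB c0 = true := List.all_eq_true.mp hb c0 hc0mem
    have hc0cl : isCloseB c0 = true := by
      rw [bracket_iff, hc0] at hc0br
      simpa using hc0br
    have htake : (r.takeWhile isOpenB).all isOpenB :=
      List.all_eq_true.mpr (fun x hx => List.mem_takeWhile_imp hx)
    rw [hdec, hdrop]
    rw [runM_openers _ htake]
    rcases hrev : (r.takeWhile isOpenB).reverse with _ | ⟨top, st'⟩
    · simp only [List.nil_append]
      simp [runM, hc0, hc0cl]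
    · have htop : isOpenB top = true := by
        have : top ∈ r.takeWhile isOpenB := by
          rw [← List.mem_reverse, hrev]; simp
        exact List.all_eq_true.mp htake top this
      simp only [List.append_nil]
      simp only [runM, hc0, hc0cl, Bool.false_eq_true, if_false, if_pos]
      have hcor : correspond c0 top = false := by
        by_contra hcor
        simp only [Bool.not_eq_false] at hcor
        have hu : r.takeWhile isOpenB = st'.reverse ++ [top] := by
          have := congrArg List.reverse hrev
          simpa using this
        have hr : r = st'.reverse ++ top :: c0 :: v := by
          rw [hdec, hdrop, hu]
          simp
        rcases correspond_pairs top c0 htop hc0cl hcor with ⟨h1, h2⟩ | ⟨h1, h2⟩ | ⟨h1, h2⟩ | ⟨h1, h2⟩ <;>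
          subst h1 <;> subst h2
        · exact rem_fix_no_adj _ _ r hf1 st'.reverse v hr
        · exact rem_fix_no_adj _ _ r hf2 st'.reverse v hr
        · exact rem_fix_no_adj _ _ r hf3 st'.reverse v hr
        · exact rem_fix_no_adj _ _ r hf4 st'.reverse v hr
      simp [hcor]

-- an all-opener residue is A's final stack (most-recent-first)
lemma runM_all_openers (r : List Char) (h : r.all isOpenB = true) :
    runM r [] = some r.reverse := by
  have := runM_openers r h [] []
  simpa using this

lemma mainEq (l r : List Char)
    (hr : r = loopB ((l.filter isBracketB).length + 1) (l.filter isBracketB)) :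
    (match runM l [] with | none => "" | some st => String.ofList st)
      = if r.any isCloseB then "" else String.ofList r.reverse := by
  have hrun : runM l [] = runM r [] := by
    rw [hr, runM_loopB, ← runM_filter]
  have hbr : r.all isBracketB = true := by
    refine List.all_eq_true.mpr (fun x hx => ?_)
    rw [hr] at hx
    have : x ∈ l.filter isBracketB := loopB_subset _ _ _ hx
    exact (List.mem_filter.mp this).2
  have hfix : reduceB r = r := by
    rw [hr]
    exact loopB_fix _ _ (by omega)
  by_cases hcl : r.any isCloseB = true
  · rw [if_pos hcl, hrun, runM_residue_closer r hbr hfix hcl]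
  · rw [if_neg (by simpa using hcl)]
    have hop : r.all isOpenB = true := by
      refine List.all_eq_true.mpr (fun x hx => ?_)
      have hbx := List.all_eq_true.mp hbr x hx
      rw [bracket_iff] at hbx
      have hcx : isCloseB x = false := by
        rcases Bool.eq_false_or_eq_true (isCloseB x) with h | h
        · exact absurd (List.any_eq_true.mpr ⟨x, hx, h⟩) hcl
        · exact h
      simpa [hcx] using hbx
    rw [hrun, runM_all_openers r hop]

-- ===== VERDICT (by name: the statement is the Claim_ definition above) =====
theorem sym_incomplete_spec : Claim_equal_sym_incomplete := by
  intro line _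
  unfold Spec_sym_incomplete sym_incomplete sym_incomplete_alt
  rw [bridgeA]
  exact mainEq line.toList _ rfl
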